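-- pv_equiv track=rewrite | github.com/claycampbell/InvestBrain | services/one_pager_service.py | _create_acquisition_timeline
-- ===== SOURCE A (Python) =====
-- from typing import Dict, List, Any, Optional
--
-- def _create_acquisition_timeline(data_requirements: List[Dict]) -> Dict[str, Any]:
--     """Create timeline for data acquisition"""
--     immediate = [req for req in data_requirements if req['criticality'] == 'High']
--     short_term = [req for req in data_requirements if req['criticality'] == 'Medium']
--     long_term = [req for req in data_requirements if req['criticality'] == 'Low']
--
--     return {
--         'immediate_priorities': [req['signal_name'] for req in immediate],
--         'short_term_goals': [req['signal_name'] for req in short_term],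
--         'long_term_objectives': [req['signal_name'] for req in long_term]
--     }
-- ===== SOURCE B (Python) =====
-- from typing import Dict, List, Any, Optional
--
-- def _create_acquisition_timeline(data_requirements: List[Dict]) -> Dict[str, Any]:
--     """Create timeline for data acquisition (single pass)"""
--     immediate, short_term, long_term = [], [], []
--     for req in data_requirements:
--         crit = req['criticality']
--         if crit == 'High':
--             immediate.append(req['signal_name'])
--         elif crit == 'Medium':
--             short_term.append(req['signal_name'])
--         elif crit == 'Low':
--             long_term.append(req['signal_name'])
--     return {
--         'immediate_priorities': immediate,
--         'short_term_goals': short_term,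
--         'long_term_objectives': long_term
--     }
-- ===== Notes on version B (the rewrite author's own statement) =====
-- stated objective: alternative
-- what changed: Replaces six list comprehensions (three criticality filters plus three signal_name projections) with one loop that buckets each requirement's signal_name into the matching list in a single pass.
import Mathlib
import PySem

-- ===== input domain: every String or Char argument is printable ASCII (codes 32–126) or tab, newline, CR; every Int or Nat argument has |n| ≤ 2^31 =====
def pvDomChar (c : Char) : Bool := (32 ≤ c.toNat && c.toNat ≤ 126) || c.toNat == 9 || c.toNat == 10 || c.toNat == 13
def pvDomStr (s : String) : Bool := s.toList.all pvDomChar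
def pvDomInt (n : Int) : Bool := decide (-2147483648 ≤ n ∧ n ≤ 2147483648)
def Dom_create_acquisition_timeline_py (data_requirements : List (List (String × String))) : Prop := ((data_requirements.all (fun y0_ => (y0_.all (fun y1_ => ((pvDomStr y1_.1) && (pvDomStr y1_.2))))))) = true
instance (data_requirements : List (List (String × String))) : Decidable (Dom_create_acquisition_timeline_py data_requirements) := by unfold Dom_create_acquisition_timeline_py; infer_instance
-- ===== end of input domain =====

-- B buckets each requirement's signal_name by criticality in ONE pass instead of A's three filter passes plus three projection passes (same results).


-- ===== PORT A =====
-- req['criticality'] / req['signal_name']; Pre_ guarantees the lookups succeed, so getD "" is never the default inside Pre_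
def pvCrit (req : List (String × String)) : String :=
  ((PySem.Dict.ofList req).get? "criticality").getD ""

def pvSig (req : List (String × String)) : String :=
  ((PySem.Dict.ofList req).get? "signal_name").getD ""

def create_acquisition_timeline_py (data_requirements : List (List (String × String))) : List (String × List String) :=
  let immediate := data_requirements.filter (fun req => pvCrit req == "High")
  let short_term := data_requirements.filter (fun req => pvCrit req == "Medium")
  let long_term := data_requirements.filter (fun req => pvCrit req == "Low")
  [("immediate_priorities", immediate.map pvSig),
   ("short_term_goals", short_term.map pvSig),
   ("long_term_objectives", long_term.map pvSig)]

-- ===== PORT B =====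
def pvStep (acc : List String × List String × List String) (req : List (String × String)) :
    List String × List String × List String :=
  let crit := pvCrit req
  if crit = "High" then (acc.1 ++ [pvSig req], acc.2.1, acc.2.2)
  else if crit = "Medium" then (acc.1, acc.2.1 ++ [pvSig req], acc.2.2)
  else if crit = "Low" then (acc.1, acc.2.1, acc.2.2 ++ [pvSig req])
  else acc

def create_acquisition_timeline_py_alt (data_requirements : List (List (String × String))) : List (String × List String) :=
  let res := data_requirements.foldl pvStep ([], [], [])
  [("immediate_priorities", res.1),
   ("short_term_goals", res.2.1),
   ("long_term_objectives", res.2.2)]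

-- ===== PRECONDITION & SPEC =====
-- Pre_ excludes exactly the inputs where the Python raises KeyError: a requirement without a
-- 'criticality' key, or a requirement whose criticality is High/Medium/Low but has no 'signal_name' key.
def Pre_create_acquisition_timeline_py (data_requirements : List (List (String × String))) : Prop :=
  ∀ req ∈ data_requirements,
    (PySem.Dict.ofList req).contains "criticality" = true ∧
    (((PySem.Dict.ofList req).get? "criticality" = some "High" ∨
      (PySem.Dict.ofList req).get? "criticality" = some "Medium" ∨
      (PySem.Dict.ofList req).get? "criticality" = some "Low") →
      (PySem.Dict.ofList req).contains "signal_name" = true)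
instance (data_requirements : List (List (String × String))) : Decidable (Pre_create_acquisition_timeline_py data_requirements) := by unfold Pre_create_acquisition_timeline_py; infer_instance

def pvWitness_create_acquisition_timeline_py : (List (List (String × String))) :=
  [[("criticality", "High"), ("signal_name", "revenue")], [("criticality", "Low"), ("signal_name", "churn")]]

def Spec_create_acquisition_timeline_py (data_requirements : List (List (String × String))) (out : List (String × List String)) : Prop := out = create_acquisition_timeline_py_alt data_requirements
instance (data_requirements : List (List (String × String))) (out : List (String × List String)) : Decidable (Spec_create_acquisition_timeline_py data_requirements out) := by unfold Spec_create_acquisition_timeline_py; infer_instance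

-- ===== CLAIM (what is proved, stated in full; the proofs are below) =====
def Claim_equal_create_acquisition_timeline_py : Prop := ∀ (data_requirements : List (List (String × String))), Dom_create_acquisition_timeline_py data_requirements → Pre_create_acquisition_timeline_py data_requirements → Spec_create_acquisition_timeline_py data_requirements (create_acquisition_timeline_py data_requirements)

-- ===== LEMMAS AND PROOFS =====
-- The fold with three accumulators produces exactly A's three filter-then-map lists, appended.
theorem pvStep_foldl (drs : List (List (String × String)))
    (a b c : List String) :
    drs.foldl pvStep (a, b, c) =
      (a ++ (drs.filter (fun req => pvCrit req == "High")).map pvSig,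
       b ++ (drs.filter (fun req => pvCrit req == "Medium")).map pvSig,
       c ++ (drs.filter (fun req => pvCrit req == "Low")).map pvSig) := by
  induction drs generalizing a b c with
  | nil => simp
  | cons r rest ih =>
    simp only [List.foldl_cons, List.filter_cons, pvStep]
    by_cases h1 : pvCrit r = "High"
    · simp [h1, ih]
    · by_cases h2 : pvCrit r = "Medium"
      · simp [h1, h2, ih]
      · by_cases h3 : pvCrit r = "Low"
        · simp [h1, h2, h3, ih]
        · simp [h1, h2, h3, ih]

-- ===== VERDICT (by name: the statement is the Claim_ definition above) =====
theorem create_acquisition_timeline_py_spec : Claim_equal_create_acquisition_timeline_py := by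
  intro drs _ _
  unfold Spec_create_acquisition_timeline_py create_acquisition_timeline_py create_acquisition_timeline_py_alt
  simp [pvStep_foldl]
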